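-- pv_equiv track=rewrite | github.com/RafinhaTN/Scrum | 4 - Done/Trabalho/Trabalho Jogo do Bicho 1v.py | bichos
-- ===== SOURCE A (Python) =====
-- def bichos(n, m):
--     """
--     :param n: Transformo  os 2 ultimos nº de "n"
--     :param m: Transformo  os 2 ultimos nº de "m"
--     :return jogo_bicho: Envio um TRUE or FALSE caso aconteça ou não
--     """
--     listinha = list()
--     n = n[-2:: 1]  # Explicito que só quero os 2 ultimos nº de "n"
--     m = m[-2:: 1]  # Explicito que só quero os 2 ultimos nº de "m"
--
--     if n == "00":  # O nº 100 da listinha tem 3 digitos, logo o "00" irá assumir papel de 100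
--         n = "100"
--
--     if m == "00":  # O nº 100 da listinha tem 3 digitos, logo o "00" irá assumir papel de 100
--         m = "100"
--
--     for i in range(0, 100, 4):  # Criei uma lista que vai de 1 até 100
--         listinha = [1 + i, 2 + i, 3 + i, 4 + i]  # i soma com os valores na lista até chegar ao 100
--         i += 4
--
--         if int(n) in listinha and int(m) in listinha:
--             jogo_bicho = True  # Crio uma variavel que prove se o valor é verdadeiro
--             break
--
--     else:
--         jogo_bicho = False  # Se não for, ela é falsa
--
--     return jogo_bicho
-- ===== SOURCE B (Python) =====
-- def bichos(n, m):
--     def grp(s):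
--         s = s[-2:]
--         if s == "00":
--             s = "100"
--         v = int(s)
--         return (v - 1) // 4 if 1 <= v <= 100 else None
--     g = grp(n)
--     return g is not None and g == grp(m)
-- ===== Notes on version B (the rewrite author's own statement) =====
-- stated objective: simpler
-- what changed: Replaces the 25-iteration block-list building loop with a closed-form group index (v-1)//4 plus a 1..100 range check, keeping the same last-two-digits and '00'->'100' preprocessing.
import Mathlib
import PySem

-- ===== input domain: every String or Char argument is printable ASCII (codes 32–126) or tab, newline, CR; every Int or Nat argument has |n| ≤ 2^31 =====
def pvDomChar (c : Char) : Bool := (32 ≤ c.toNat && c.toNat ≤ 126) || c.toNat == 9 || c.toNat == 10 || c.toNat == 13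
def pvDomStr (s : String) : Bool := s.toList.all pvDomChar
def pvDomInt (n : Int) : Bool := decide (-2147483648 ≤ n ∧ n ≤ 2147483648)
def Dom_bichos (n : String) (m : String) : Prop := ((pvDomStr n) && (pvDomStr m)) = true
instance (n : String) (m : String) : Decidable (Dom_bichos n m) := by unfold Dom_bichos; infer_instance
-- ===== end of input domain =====

-- B replaces A's 25-iteration block-list loop with a closed-form group index (v-1)//4 plus a
-- 1..100 range check (objective: simpler). Equivalence is about return values; neither mutates.

-- ===== PORT A =====
-- the for-loop over range(0, 100, 4): each step builds listinha = [1+i, 2+i, 3+i, 4+i] and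
-- breaks with True if both values are members; falling off the range gives False (for-else)
def bichosLoop (nv mv : Int) : List Int → Bool
  | [] => false
  | i :: rest =>
    let listinha : List Int := [1 + i, 2 + i, 3 + i, 4 + i]
    if listinha.contains nv && listinha.contains mv then true
    else bichosLoop nv mv rest

-- int(...) is PySem.Int.ofStr?; Pre_bichos excludes the inputs where the Python int() calls it
-- actually performs would raise ValueError, so '.getD 0' is never the value used there
def bichos (n : String) (m : String) : Bool :=
  let n1 := PySem.Str.slice n (some (-2)) none        -- n[-2::1]
  let m1 := PySem.Str.slice m (some (-2)) none        -- m[-2::1]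
  let n2 := if n1 = "00" then "100" else n1
  let m2 := if m1 = "00" then "100" else m1
  bichosLoop ((PySem.Int.ofStr? n2).getD 0) ((PySem.Int.ofStr? m2).getD 0)
    (PySem.List.pyRange 0 100 4)

-- ===== PORT B =====
-- grp(s): last two characters, '00' -> '100', then the group (v-1)//4 when 1 <= v <= 100 else None
def grpB (s : String) : Option Int :=
  let s1 := PySem.Str.slice s (some (-2)) none        -- s[-2:]
  let s2 := if s1 = "00" then "100" else s1
  let v := (PySem.Int.ofStr? s2).getD 0               -- int(s); Pre_ excludes ValueError
  if 1 ≤ v ∧ v ≤ 100 then some (PySem.Int.floordiv (v - 1) 4) else none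

def bichos_alt (n : String) (m : String) : Bool :=
  let g := grpB n
  g.isSome && (g == grpB m)

-- ===== PRECONDITION & SPEC =====
-- pvParse s = int(s[-2:] with '00'->'100'); none exactly where that int() raises ValueError
def pvParse (s : String) : Option Int :=
  let s1 := PySem.Str.slice s (some (-2)) none
  PySem.Int.ofStr? (if s1 = "00" then "100" else s1)

-- Pre_ excludes exactly the inputs where the Python A raises ValueError: n must parse, and m
-- must parse whenever A's short-circuit 'int(n) in listinha and int(m) in listinha' reaches
-- int(m), i.e. whenever n's value lies in 1..100 (B short-circuits identically and also raises there)
def Pre_bichos (n : String) (m : String) : Prop :=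
  (pvParse n).isSome = true ∧
    (1 ≤ (pvParse n).getD 0 ∧ (pvParse n).getD 0 ≤ 100 → (pvParse m).isSome = true)
instance (n : String) (m : String) : Decidable (Pre_bichos n m) := by
  unfold Pre_bichos; infer_instance

def pvWitness_bichos : String × String := ("07", "8")

def Spec_bichos (n : String) (m : String) (out : Bool) : Prop := out = bichos_alt n m
instance (n : String) (m : String) (out : Bool) : Decidable (Spec_bichos n m out) := by
  unfold Spec_bichos; infer_instance

-- ===== CLAIM (what is proved, stated in full; the proofs are below) =====
def Claim_equal_bichos : Prop :=
  ∀ (n : String) (m : String), Dom_bichos n m → Pre_bichos n m → Spec_bichos n m (bichos n m)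

-- ===== LEMMAS AND PROOFS =====
lemma fdiv4 (x : Int) : x.fdiv 4 = x / 4 := by
  rw [Int.fdiv_eq_ediv]; simp

lemma bichosLoop_any (a b : Int) (l : List Int) :
    bichosLoop a b l =
      l.any (fun i => [1+i,2+i,3+i,4+i].contains a && [1+i,2+i,3+i,4+i].contains b) := by
  induction l with
  | nil => rfl
  | cons i rest ih =>
    simp only [bichosLoop, List.any_cons, ← ih]
    split_ifs with h <;> simp_all

lemma bichosLoop_true_iff (a b : Int) :
    bichosLoop a b (PySem.List.pyRange 0 100 4) = true ↔
    (1 ≤ a ∧ a ≤ 100 ∧ 1 ≤ b ∧ b ≤ 100 ∧ (a-1).fdiv 4 = (b-1).fdiv 4) := by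
  rw [bichosLoop_any, fdiv4, fdiv4]
  simp only [List.any_eq_true, List.contains_cons, List.contains_nil, Bool.or_false,
    Bool.and_eq_true, Bool.or_eq_true, beq_iff_eq,
    PySem.List.mem_pyRange_iff_of_pos (by norm_num : (0:Int) < 4)]
  constructor
  · rintro ⟨i, ⟨h0, h100, k, hk⟩, h⟩; omega
  · rintro ⟨h1, h2, h3, h4, h5⟩
    exact ⟨4 * ((a-1)/4), ⟨by omega, by omega, ⟨(a-1)/4, by omega⟩⟩, by omega⟩

lemma bichos_key (a b : Int) :
    bichosLoop a b (PySem.List.pyRange 0 100 4) =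
      ((if 1 ≤ a ∧ a ≤ 100 then some (PySem.Int.floordiv (a - 1) 4) else none).isSome &&
        ((if 1 ≤ a ∧ a ≤ 100 then some (PySem.Int.floordiv (a - 1) 4) else none) ==
          (if 1 ≤ b ∧ b ≤ 100 then some (PySem.Int.floordiv (b - 1) 4) else none))) := by
  have hfd : PySem.Int.floordiv = Int.fdiv := rfl
  cases h : bichosLoop a b (PySem.List.pyRange 0 100 4) with
  | true =>
    obtain ⟨h1, h2, h3, h4, h5⟩ := (bichosLoop_true_iff a b).mp h
    rw [if_pos ⟨h1, h2⟩, if_pos ⟨h3, h4⟩]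
    simp [hfd, h5]
  | false =>
    have hnp : ¬(1 ≤ a ∧ a ≤ 100 ∧ 1 ≤ b ∧ b ≤ 100 ∧ (a-1).fdiv 4 = (b-1).fdiv 4) := by
      intro hp
      rw [(bichosLoop_true_iff a b).mpr hp] at h
      exact absurd h (by decide)
    symm
    split_ifs with ha hb
    · simp only [Option.isSome_some, Bool.true_and, hfd]
      rw [Bool.eq_false_iff]
      intro hbe
      exact hnp ⟨ha.1, ha.2, hb.1, hb.2, Option.some.inj (eq_of_beq hbe)⟩
    all_goals rfl

-- ===== VERDICT (by name: the statement is the Claim_ definition above) =====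
theorem bichos_spec : Claim_equal_bichos := by
  intro n m _ _
  unfold Spec_bichos bichos bichos_alt grpB
  exact bichos_key _ _
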